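-- pv_equiv track=rewrite | github.com/christofmuc/KnobKraft-orm | adaptations/Korg_microKORG.py | unescapeSysex
-- ===== SOURCE A (Python) =====
-- def unescapeSysex(sysex_7bit_data):
--     # This function converts 7-bit sysex data back to 8-bit data.
--     data_8bit = []
--     i = 0
--     while i < len(sysex_7bit_data):
--         msbs = sysex_7bit_data[i]
--         i += 1
--         for j in range(7):
--             if i < len(sysex_7bit_data):
--                 byte = sysex_7bit_data[i]
--                 if (msbs >> j) & 1:
--                     byte |= 0x80
--                 data_8bit.append(byte)
--                 i += 1
--     return data_8bit
-- ===== SOURCE B (Python) =====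
-- def unescapeSysex(sysex_7bit_data):
--     # Chunked decomposition: one MSB byte followed by up to 7 payload bytes per block.
--     data_8bit = []
--     for i in range(0, len(sysex_7bit_data), 8):
--         block = sysex_7bit_data[i:i + 8]
--         msbs = block[0]
--         data_8bit.extend(
--             byte | 0x80 if (msbs >> j) & 1 else byte
--             for j, byte in enumerate(block[1:])
--         )
--     return data_8bit
-- ===== Notes on version B (the rewrite author's own statement) =====
-- stated objective: simpler
-- what changed: B replaces A's flat running index with its per-byte bounds checks by iterating in 8-byte blocks (range with step 8 plus slicing), reading the MSB byte as the block's first element and decoding the rest of the block with enumerate; the final short slice handles the partial group without any in-loop length test.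
import Mathlib
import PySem

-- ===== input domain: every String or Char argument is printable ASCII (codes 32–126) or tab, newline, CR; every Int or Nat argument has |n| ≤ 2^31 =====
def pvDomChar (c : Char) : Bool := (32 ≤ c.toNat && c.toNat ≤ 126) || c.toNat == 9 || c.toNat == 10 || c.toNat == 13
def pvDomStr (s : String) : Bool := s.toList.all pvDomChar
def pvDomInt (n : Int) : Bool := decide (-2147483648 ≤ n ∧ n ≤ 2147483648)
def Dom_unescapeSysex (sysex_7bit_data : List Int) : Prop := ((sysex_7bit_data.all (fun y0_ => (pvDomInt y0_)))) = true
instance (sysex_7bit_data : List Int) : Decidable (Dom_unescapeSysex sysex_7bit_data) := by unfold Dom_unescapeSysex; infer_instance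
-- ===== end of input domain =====

-- B re-decomposes A's flat running-index loop into 8-byte block slicing (objective: simpler); same return value, no side effects.

-- ===== PORT A =====
-- inner 'for j in range(7)' body: state is (i, data_8bit); xs.getD is exact for the
-- nonnegative in-range index i (the branch guard ensures i < len).
def uA_inner (xs : List Int) (msbs : Int) (s : Nat × List Int) (j : Nat) : Nat × List Int :=
  if s.1 < xs.length then
    let byte := xs.getD s.1 0
    let byte := if PySem.Int.band (msbs >>> j) 1 ≠ 0 then PySem.Int.bor byte 128 else byte
    (s.1 + 1, s.2 ++ [byte])
  else s

-- the inner loop never decreases i (used only for termination of the while loop)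
theorem uA_inner_fst_le (xs : List Int) (msbs : Int) :
    ∀ (l : List Nat) (s : Nat × List Int), s.1 ≤ ((l.foldl (uA_inner xs msbs) s)).1 := by
  intro l
  induction l with
  | nil => intro s; simp
  | cons j t ih =>
    intro s
    refine le_trans ?_ (ih (uA_inner xs msbs s j))
    dsimp only [uA_inner]
    split
    · simp
    · exact le_rfl

-- the 'while i < len' loop of A
def uA_loop (xs : List Int) (i : Nat) (acc : List Int) : List Int :=
  if h : i < xs.length then
    let msbs := xs.getD i 0
    let s := (List.range 7).foldl (uA_inner xs msbs) (i + 1, acc)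
    uA_loop xs s.1 s.2
  else acc
termination_by xs.length - i
decreasing_by
  have := uA_inner_fst_le xs (xs.getD i 0) (List.range 7) (i + 1, acc)
  omega

def unescapeSysex (sysex_7bit_data : List Int) : List Int :=
  uA_loop sysex_7bit_data 0 []

-- ===== PORT B =====
-- Source B: for i in range(0, len, 8): block = xs[i:i+8]; msbs = block[0];
-- extend with (byte | 0x80 if (msbs >> j) & 1 else byte for j, byte in enumerate(block[1:]))
def unescapeSysex_alt (sysex_7bit_data : List Int) : List Int :=
  (PySem.List.pyRange 0 (sysex_7bit_data.length : Int) 8).foldl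
    (fun acc i =>
      let block := PySem.List.slice sysex_7bit_data (some i) (some (i + 8))
      let msbs := PySem.List.pyGetD block 0 0
      acc ++ (PySem.List.enumerate (PySem.List.slice block (some 1) none) 0).map
        (fun (p : Int × Int) => if PySem.Int.band (msbs >>> p.1.toNat) 1 ≠ 0 then PySem.Int.bor p.2 128 else p.2))
    []

-- ===== PRECONDITION & SPEC =====
def Spec_unescapeSysex (sysex_7bit_data : List Int) (out : List Int) : Prop := out = unescapeSysex_alt sysex_7bit_data
instance (sysex_7bit_data : List Int) (out : List Int) : Decidable (Spec_unescapeSysex sysex_7bit_data out) := by unfold Spec_unescapeSysex; infer_instance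

-- ===== CLAIM (what is proved, stated in full; the proofs are below) =====
def Claim_equal_unescapeSysex : Prop := ∀ (sysex_7bit_data : List Int), Dom_unescapeSysex sysex_7bit_data → Spec_unescapeSysex sysex_7bit_data (unescapeSysex sysex_7bit_data)

-- ===== LEMMAS AND PROOFS =====

-- common reference semantics: decode one payload byte, a group, and the whole stream
def pvApp (m : Int) (j : Nat) (b : Int) : Int :=
  if PySem.Int.band (m >>> j) 1 ≠ 0 then PySem.Int.bor b 128 else b

def pvDecodeAux (m : Int) (ys : List Int) (j : Nat) : List Int :=
  match ys with
  | [] => []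
  | b :: t => pvApp m j b :: pvDecodeAux m t (j + 1)

def pvChunks (xs : List Int) : List Int :=
  match xs with
  | [] => []
  | m :: rest => pvDecodeAux m (rest.take 7) 0 ++ pvChunks (rest.drop 7)
termination_by xs.length
decreasing_by simp only [List.length_cons, List.length_drop]; omega

theorem pvChunks_nil : pvChunks [] = [] := by rw [pvChunks.eq_def]

theorem pvChunks_cons (m : Int) (rest : List Int) :
    pvChunks (m :: rest) = pvDecodeAux m (rest.take 7) 0 ++ pvChunks (rest.drop 7) := by
  rw [pvChunks.eq_def]

theorem uA_innerFold (xs : List Int) (m : Int) :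
    ∀ (n j i : Nat) (acc : List Int),
      (List.range' j n).foldl (uA_inner xs m) (i, acc)
        = (i + min n (xs.length - i), acc ++ pvDecodeAux m ((xs.drop i).take n) j) := by
  intro n
  induction n with
  | zero => intro j i acc; simp [pvDecodeAux]
  | succ n ih =>
    intro j i acc
    rw [List.range'_succ, List.foldl_cons]
    by_cases h : i < xs.length
    · have hdrop : xs.drop i = xs[i] :: xs.drop (i + 1) := List.drop_eq_getElem_cons h
      have hget : xs.getD i 0 = xs[i] := List.getD_eq_getElem xs 0 h
      simp only [uA_inner, if_pos h]
      rw [ih (j + 1) (i + 1) _]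
      rw [hdrop, List.take_succ_cons]
      simp only [pvDecodeAux, pvApp, hget, Prod.mk.injEq]
      refine ⟨by omega, by simp⟩
    · have hdrop : xs.drop i = [] := List.drop_eq_nil_of_le (by omega)
      simp only [uA_inner, if_neg h]
      rw [ih (j + 1) i acc]
      rw [hdrop]
      simp [pvDecodeAux]
      omega

theorem uA_loopEq (xs : List Int) :
    ∀ (k i : Nat) (acc : List Int), xs.length - i ≤ k →
      uA_loop xs i acc = acc ++ pvChunks (xs.drop i) := by
  intro k
  induction k with
  | zero =>
    intro i acc hk
    rw [uA_loop]
    rw [dif_neg (by omega)]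
    rw [List.drop_eq_nil_of_le (by omega)]
    simp [pvChunks_nil]
  | succ k ih =>
    intro i acc hk
    rw [uA_loop]
    by_cases h : i < xs.length
    · rw [dif_pos h]
      have hdrop : xs.drop i = xs[i] :: xs.drop (i + 1) := List.drop_eq_getElem_cons h
      have hget : xs.getD i 0 = xs[i] := List.getD_eq_getElem xs 0 h
      simp only [List.range_eq_range']
      rw [uA_innerFold xs (xs.getD i 0) 7 0 (i + 1) acc]
      rw [ih _ _ (by omega)]
      rw [hdrop, pvChunks_cons]
      have hd2 : xs.drop (i + 1 + min 7 (xs.length - (i + 1)))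
          = (xs.drop (i + 1)).drop 7 := by
        rw [List.drop_drop]
        rcases le_total 7 (xs.length - (i + 1)) with h7 | h7
        · congr 1; omega
        · rw [List.drop_eq_nil_of_le (by omega), List.drop_eq_nil_of_le (by omega)]
      rw [hd2, hget]
      simp
    · rw [dif_neg h]
      rw [List.drop_eq_nil_of_le (by omega)]
      simp [pvChunks_nil]

-- B side: induction forms of range(a, b, 8)
theorem pyRange8_nil (a b : Int) (h : b ≤ a) : PySem.List.pyRange a b 8 = [] := by
  rw [PySem.List.pyRange_of_pos a b (by norm_num)]
  rw [if_neg (by omega)]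
  simp

theorem pyRange8_cons (a b : Int) (h : a < b) :
    PySem.List.pyRange a b 8 = a :: PySem.List.pyRange (a + 8) b 8 := by
  rw [PySem.List.pyRange_of_pos a b (by norm_num), PySem.List.pyRange_of_pos (a + 8) b (by norm_num)]
  rw [if_pos h]
  have hn : ((b - a + 8 - 1) / 8).toNat
      = (if a + 8 < b then ((b - (a + 8) + 8 - 1) / 8).toNat else 0) + 1 := by
    split <;> omega
  rw [hn, List.range_succ_eq_map]
  simp only [List.map_cons, List.map_map]
  congr 1
  · simp
  · apply List.map_congr_left
    intro k _
    simp [Function.comp]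
    ring

theorem enumMap (m : Int) :
    ∀ (ys : List Int) (j : Nat),
      (PySem.List.enumerate ys (j : Int)).map (fun p => pvApp m p.1.toNat p.2)
        = pvDecodeAux m ys j := by
  intro ys
  induction ys with
  | nil => intro j; simp [PySem.List.enumerate_nil, pvDecodeAux]
  | cons b t ih =>
    intro j
    rw [PySem.List.enumerate_cons, List.map_cons]
    have h1 : (j : Int) + 1 = ((j + 1 : Nat) : Int) := by push_cast; ring
    rw [h1, ih (j + 1)]
    show pvApp m ((j : Int)).toNat b :: pvDecodeAux m t (j + 1) = pvDecodeAux m (b :: t) j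
    rw [Int.toNat_natCast]
    rfl

theorem uB_foldEq (xs : List Int) :
    ∀ (c k : Nat) (acc : List Int), xs.length - k ≤ c →
      (PySem.List.pyRange (k : Int) (xs.length : Int) 8).foldl
        (fun acc i =>
          let block := PySem.List.slice xs (some i) (some (i + 8))
          let msbs := PySem.List.pyGetD block 0 0
          acc ++ (PySem.List.enumerate (PySem.List.slice block (some 1) none) 0).map
            (fun (p : Int × Int) => if PySem.Int.band (msbs >>> p.1.toNat) 1 ≠ 0 then PySem.Int.bor p.2 128 else p.2))
        acc
      = acc ++ pvChunks (xs.drop k) := by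
  intro c
  induction c with
  | zero =>
    intro k acc hk
    rw [pyRange8_nil _ _ (by exact_mod_cast Nat.le_of_sub_eq_zero (by omega))]
    rw [List.drop_eq_nil_of_le (by omega)]
    simp [pvChunks_nil]
  | succ c ih =>
    intro k acc hk
    by_cases h : k < xs.length
    · rw [pyRange8_cons _ _ (by exact_mod_cast h), List.foldl_cons]
      have hblock : PySem.List.slice xs (some (k : Int)) (some ((k : Int) + 8))
          = (xs.drop k).take 8 := by
        have := PySem.List.slice_natCast_add xs k 8
        simpa using this
      have hdrop : xs.drop k = xs[k] :: xs.drop (k + 1) := List.drop_eq_getElem_cons h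
      have hstep :
          (let block := PySem.List.slice xs (some (k : Int)) (some ((k : Int) + 8))
           let msbs := PySem.List.pyGetD block 0 0
           acc ++ (PySem.List.enumerate (PySem.List.slice block (some 1) none) 0).map
             (fun (p : Int × Int) => if PySem.Int.band (msbs >>> p.1.toNat) 1 ≠ 0 then PySem.Int.bor p.2 128 else p.2))
          = acc ++ pvDecodeAux xs[k] ((xs.drop (k + 1)).take 7) 0 := by
        dsimp only
        rw [hblock, hdrop, List.take_succ_cons, PySem.List.slice_from_one, List.tail_cons,
          PySem.List.pyGetD_zero_cons]
        congr 1
        exact enumMap xs[k] ((xs.drop (k + 1)).take 7) 0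
      rw [hstep]
      have hcast : (k : Int) + 8 = ((k + 8 : Nat) : Int) := by push_cast; ring
      rw [hcast, ih (k + 8) _ (by omega)]
      rw [hdrop, pvChunks_cons]
      have hdd : xs.drop (k + 8) = (xs.drop (k + 1)).drop 7 := by
        rw [List.drop_drop]
      rw [hdd]
      simp
    · rw [pyRange8_nil _ _ (by exact_mod_cast (by omega : xs.length ≤ k))]
      rw [List.drop_eq_nil_of_le (by omega)]
      simp [pvChunks_nil]

theorem uA_eq_chunks (xs : List Int) : unescapeSysex xs = pvChunks xs := by
  unfold unescapeSysex
  have := uA_loopEq xs xs.length 0 [] (by omega)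
  simpa using this

theorem uB_eq_chunks (xs : List Int) : unescapeSysex_alt xs = pvChunks xs := by
  unfold unescapeSysex_alt
  have := uB_foldEq xs xs.length 0 [] (by omega)
  simpa using this

-- ===== VERDICT (by name: the statement is the Claim_ definition above) =====
theorem unescapeSysex_spec : Claim_equal_unescapeSysex := by
  intro xs _
  unfold Spec_unescapeSysex
  rw [uA_eq_chunks, uB_eq_chunks]
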